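-- pv_equiv track=rewrite | github.com/Adrian-Garcia/Python-Algorithms | list/findDuplicateNumber.py | findDuplicate0
-- ===== SOURCE A (Python) =====
-- def findDuplicate0(nums):
--
--     tortoise = nums[0]
--     hare = nums[0]
--
--     while True:
--
--         tortoise = nums[tortoise]
--         hare = nums[nums[hare]]
--
--         if tortoise == hare:
--             break
--
--     ptr1 = nums[0]
--     ptr2 = tortoise
--
--     while ptr1 != ptr2:
--         ptr1 = nums[ptr1]
--         ptr2 = nums[ptr2]
--
--     return ptr1
-- ===== SOURCE B (Python) =====
-- def findDuplicate0(nums):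
--     seen = set()
--     x = nums[0]
--     while x not in seen:
--         seen.add(x)
--         x = nums[x]
--     return x
-- ===== Notes on version B (the rewrite author's own statement) =====
-- stated objective: simpler
-- what changed: Replaces Floyd's two-phase tortoise/hare cycle detection by a single walk of the same pointer chain that records visited values in a set and returns the first value seen twice (the cycle entrance, which equals Floyd's phase-2 result).
-- outside the precondition, e.g. on findDuplicate0([1, 1, 100]): A returns 1, B returns 1
import Mathlib
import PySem

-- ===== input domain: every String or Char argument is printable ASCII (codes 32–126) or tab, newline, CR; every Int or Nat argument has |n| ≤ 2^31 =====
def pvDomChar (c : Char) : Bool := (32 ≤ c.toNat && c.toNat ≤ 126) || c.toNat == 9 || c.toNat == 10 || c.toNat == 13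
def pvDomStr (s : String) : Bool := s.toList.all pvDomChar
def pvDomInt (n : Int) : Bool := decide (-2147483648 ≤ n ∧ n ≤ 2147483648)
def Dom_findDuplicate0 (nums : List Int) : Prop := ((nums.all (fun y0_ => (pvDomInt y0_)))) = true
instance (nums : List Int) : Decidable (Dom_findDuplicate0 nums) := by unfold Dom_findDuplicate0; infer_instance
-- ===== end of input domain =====

-- B replaces Floyd's two-phase tortoise/hare cycle detection by a single walk of the same
-- pointer chain with a `seen` set, returning the first value met twice (objective: simpler).

-- ===== PORT A =====
-- the `while True` loop: tortoise = nums[tortoise]; hare = nums[nums[hare]]; break when equal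
-- (the fuel only bounds the recursion depth; on Pre_ it is proved never to run out)
def fdStep1 (nums : List Int) (t h : Int) : Nat → Option Int
  | 0 => none
  | fuel+1 =>
    match PySem.List.pyGet? nums t with
    | none => none
    | some t' =>
      match PySem.List.pyGet? nums h with
      | none => none
      | some h1 =>
        match PySem.List.pyGet? nums h1 with
        | none => none
        | some h' => if t' = h' then some t' else fdStep1 nums t' h' fuel

-- the `while ptr1 != ptr2` loop
def fdStep2 (nums : List Int) (p1 p2 : Int) : Nat → Option Int
  | 0 => none
  | fuel+1 =>
    if p1 = p2 then some p1
    else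
      match PySem.List.pyGet? nums p1 with
      | none => none
      | some q1 =>
        match PySem.List.pyGet? nums p2 with
        | none => none
        | some q2 => fdStep2 nums q1 q2 fuel

def findDuplicate0 (nums : List Int) : Int :=
  match PySem.List.pyGet? nums 0 with
  | none => 0
  | some s =>
    match fdStep1 nums s s ((2*nums.length+1)*(2*nums.length+1)) with
    | none => 0
    | some m =>
      match fdStep2 nums s m ((2*nums.length+1)*(2*nums.length+1)) with
      | none => 0
      | some r => r

-- ===== PORT B =====
-- the `while x not in seen: seen.add(x); x = nums[x]` loop
def fdWalk (nums : List Int) (seen : PySem.Set Int) (x : Int) : Nat → Option Int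
  | 0 => none
  | fuel+1 =>
    if PySem.Set.contains seen x then some x
    else
      match PySem.List.pyGet? nums x with
      | none => none
      | some x' => fdWalk nums (PySem.Set.add seen x) x' fuel

def findDuplicate0_alt (nums : List Int) : Int :=
  match PySem.List.pyGet? nums 0 with
  | none => 0
  | some x0 =>
    match fdWalk nums PySem.Set.empty x0 ((2*nums.length+1)*(2*nums.length+1)) with
    | none => 0
    | some r => r

-- ===== PRECONDITION & SPEC =====
-- Pre_ excludes inputs on which A raises IndexError (empty list, or an out-of-range element); as a
-- stated narrowing it also excludes inputs A returns on only because the pointer chain happens to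
-- avoid every out-of-range element — B follows the identical chain and agrees there too, but the
-- closed-form Pre_ requires every element to be a valid Python index (negative wraparound allowed).
def Pre_findDuplicate0 (nums : List Int) : Prop :=
  nums ≠ [] ∧ ∀ v ∈ nums, -(nums.length : Int) ≤ v ∧ v < (nums.length : Int)
instance (nums : List Int) : Decidable (Pre_findDuplicate0 nums) := by
  unfold Pre_findDuplicate0; infer_instance
def pvWitness_findDuplicate0 : List Int := [1, 0]

def Spec_findDuplicate0 (nums : List Int) (out : Int) : Prop := out = findDuplicate0_alt nums
instance (nums : List Int) (out : Int) : Decidable (Spec_findDuplicate0 nums out) := by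
  unfold Spec_findDuplicate0; infer_instance

-- ===== CLAIM (what is proved, stated in full; the proofs are below) =====
def Claim_equal_findDuplicate0 : Prop := ∀ (nums : List Int), Dom_findDuplicate0 nums → Pre_findDuplicate0 nums → Spec_findDuplicate0 nums (findDuplicate0 nums)

-- ===== LEMMAS AND PROOFS =====

-- the step function of the pointer chain, and the chain itself: x 0 = nums[0], x (k+1) = nums[x k]
def fdf (nums : List Int) (i : Int) : Int := PySem.List.pyGetD nums i 0
def fdx (nums : List Int) : Nat → Int
  | 0 => fdf nums 0
  | k+1 => fdf nums (fdx nums k)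

theorem fd_get (xs : List Int) (i : Int) (h : PySem.Raise.InRange xs.length i) :
    PySem.List.pyGet? xs i = some (PySem.List.pyGetD xs i 0) := by
  cases hE : PySem.List.pyGet? xs i with
  | none => exact absurd h ((PySem.List.pyGet?_eq_none_iff xs i).mp hE)
  | some v => simp [PySem.List.pyGetD, hE]

theorem fd_inRange0 (nums : List Int) (hne : nums ≠ []) :
    PySem.Raise.InRange nums.length 0 := by
  have : 0 < nums.length := List.length_pos_iff.mpr hne
  exact ⟨by omega, by exact_mod_cast this⟩

theorem fd_inRange (nums : List Int) (hP : Pre_findDuplicate0 nums) :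
    ∀ k, PySem.Raise.InRange nums.length (fdx nums k) := by
  obtain ⟨hne, hall⟩ := hP
  have h0 := fd_inRange0 nums hne
  intro k
  induction k with
  | zero =>
    have h2 := hall _ (PySem.List.pyGetD_mem nums 0 h0)
    refine ⟨?_, ?_⟩ <;> simp only [fdx, fdf] <;> omega
  | succ k ih =>
    have h2 := hall _ (PySem.List.pyGetD_mem nums 0 ih)
    refine ⟨?_, ?_⟩ <;> simp only [fdx, fdf] <;> omega

theorem fd_get_x (nums : List Int) (hP : Pre_findDuplicate0 nums) (k : Nat) :
    PySem.List.pyGet? nums (fdx nums k) = some (fdx nums (k+1)) :=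
  fd_get nums (fdx nums k) (fd_inRange nums hP k)

theorem fd_get_0 (nums : List Int) (hP : Pre_findDuplicate0 nums) :
    PySem.List.pyGet? nums 0 = some (fdx nums 0) :=
  fd_get nums 0 (fd_inRange0 nums hP.1)

-- pigeonhole: the chain repeats within the first 2n+1 values
theorem fd_pigeonhole (nums : List Int) (hP : Pre_findDuplicate0 nums) :
    ∃ i j : Nat, i < j ∧ j ≤ 2 * nums.length ∧ fdx nums i = fdx nums j := by
  have hmap : ∀ k ∈ Finset.range (2*nums.length+1),
      fdx nums k ∈ Finset.Ico (-(nums.length:Int)) (nums.length:Int) := by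
    intro k _
    have := fd_inRange nums hP k
    simp only [Finset.mem_Ico]
    exact this
  have hcard : (Finset.Ico (-(nums.length:Int)) (nums.length:Int)).card
      < (Finset.range (2*nums.length+1)).card := by
    rw [Int.card_Ico]
    simp only [Finset.card_range]
    omega
  obtain ⟨a, ha, b, hb, hab, heq⟩ :=
    Finset.exists_ne_map_eq_of_card_lt_of_maps_to hcard hmap
  simp only [Finset.mem_range] at ha hb
  rcases Nat.lt_or_ge a b with h | h
  · exact ⟨a, b, h, by omega, heq⟩
  · exact ⟨b, a, by omega, by omega, heq.symm⟩

-- structure of an eventually-periodic chain: tail length μ, period L, Floyd meeting index K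
theorem fd_master (f : Int → Int) (x : Nat → Int) (N : Nat)
    (hx : ∀ k, x (k+1) = f (x k))
    (i j : Nat) (hij : i < j) (hjN : j ≤ N) (hxij : x i = x j) :
    ∃ μ L K, 0 < L ∧ 0 < K ∧ μ + L ≤ N ∧ K ≤ N * N ∧ μ ≤ K ∧
      x (μ + L) = x μ ∧ x (μ + K) = x μ ∧
      (∀ m p, m < μ → 0 < p → x (m + p) ≠ x m) ∧
      (∀ m p, 0 < p → m + p < μ + L → x (m + p) ≠ x m) ∧
      x K = x (2 * K) ∧ (∀ k, 0 < k → k < K → x k ≠ x (2 * k)) := by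
  classical
  -- a repetition propagates forward along the chain
  have fwd : ∀ m p, x (m + p) = x m → ∀ t, x (m + t + p) = x (m + t) := by
    intro m p h t
    induction t with
    | zero => simpa using h
    | succ t ih =>
      have e1 : m + (t+1) + p = (m + t + p) + 1 := by omega
      have e2 : m + (t+1) = (m + t) + 1 := by omega
      rw [e1, e2, hx, hx, ih]
  have hPex : ∃ m, ∃ p, 0 < p ∧ x (m + p) = x m :=
    ⟨i, j - i, by omega, by rw [Nat.add_sub_cancel' hij.le]; exact hxij.symm⟩
  set μ := Nat.find hPex with hμdef
  have hPμ : ∃ p, 0 < p ∧ x (μ + p) = x μ := Nat.find_spec hPex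
  have hμmin : ∀ m, m < μ → ¬ ∃ p, 0 < p ∧ x (m + p) = x m := fun m hm => Nat.find_min hPex hm
  set L := Nat.find hPμ with hLdef
  have hL : 0 < L ∧ x (μ + L) = x μ := Nat.find_spec hPμ
  have hLmin : ∀ p, p < L → ¬ (0 < p ∧ x (μ + p) = x μ) := fun p hp => Nat.find_min hPμ hp
  -- multiples of the period
  have mult : ∀ c d, x (μ + d + c * L) = x (μ + d) := by
    intro c
    induction c with
    | zero => intro d; simp
    | succ c ih =>
      intro d
      have e : μ + d + (c+1) * L = μ + (d + c * L) + L := by ring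
      rw [e, fwd μ L hL.2 (d + c * L)]
      have e2 : μ + (d + c * L) = μ + d + c * L := by omega
      rw [e2, ih]
  -- any repetition at or after μ has period divisible by L
  have div : ∀ m p, μ ≤ m → 0 < p → x (m + p) = x m → L ∣ p := by
    intro m p hμm hp h
    have h1 : x (μ + (m - μ) * L + p) = x (μ + (m - μ) * L) := by
      have hdd : (m - μ) ≤ (m - μ) * L := Nat.le_mul_of_pos_right _ hL.1
      have ht : μ + (m - μ) * L = m + ((m - μ) * L - (m - μ)) := by omega
      rw [ht]
      exact fwd m p h _
    have h2 : x (μ + (m - μ) * L) = x μ := by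
      have := mult (m - μ) 0
      simpa using this
    have h3 : x (μ + (m - μ) * L + p) = x (μ + p) := by
      have e : μ + (m - μ) * L + p = μ + p + (m - μ) * L := by omega
      rw [e, mult (m - μ) p]
    have hrepμ : x (μ + p) = x μ := by rw [← h3, h1, h2]
    have hco : x (μ + p % L) = x μ := by
      have e : μ + p = μ + p % L + (p / L) * L := by
        have h1' := Nat.mod_add_div p L
        have h2' : L * (p / L) = (p / L) * L := Nat.mul_comm _ _
        omega
      have hm := mult (p / L) (p % L)
      rw [← hm, ← e, hrepμ]
    rcases Nat.eq_zero_or_pos (p % L) with h0 | h0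
    · exact Nat.dvd_of_mod_eq_zero h0
    · exact absurd ⟨h0, hco⟩ (hLmin _ (Nat.mod_lt p hL.1))
  have hμi : μ ≤ i := Nat.find_le
    ⟨j - i, by omega, by rw [Nat.add_sub_cancel' hij.le]; exact hxij.symm⟩
  have hLji : L ∣ (j - i) := by
    apply div i (j - i) hμi (by omega)
    rw [Nat.add_sub_cancel' hij.le]; exact hxij.symm
  have hLle : L ≤ j - i := Nat.le_of_dvd (by omega) hLji
  have hμLN : μ + L ≤ N := by omega
  -- the Floyd meeting index
  have hq0 : 0 < L * (μ + 1) := Nat.mul_pos hL.1 (Nat.succ_pos μ)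
  have hqx : x (L * (μ + 1)) = x (2 * (L * (μ + 1))) := by
    have hge : μ ≤ L * (μ + 1) := by
      calc μ ≤ 1 * (μ + 1) := by omega
        _ ≤ L * (μ + 1) := Nat.mul_le_mul_right _ hL.1
    have hc : (μ + 1) * L = L * (μ + 1) := Nat.mul_comm _ _
    have e : 2 * (L * (μ + 1)) = μ + (L * (μ + 1) - μ) + (μ + 1) * L := by omega
    rw [e, mult (μ + 1) (L * (μ + 1) - μ)]
    congr 1
    omega
  have hQex : ∃ k, 0 < k ∧ x k = x (2 * k) := ⟨L * (μ + 1), hq0, hqx⟩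
  set K := Nat.find hQex with hKdef
  have hK : 0 < K ∧ x K = x (2 * K) := Nat.find_spec hQex
  have hKmin : ∀ k, 0 < k → k < K → x k ≠ x (2 * k) := by
    intro k hk hkK h
    exact Nat.find_min hQex hkK ⟨hk, h⟩
  have hKle : K ≤ N * N := by
    have h1 : K ≤ L * (μ + 1) := Nat.find_le ⟨hq0, hqx⟩
    have hLN : L ≤ N := by omega
    have hμ1N : μ + 1 ≤ N := by omega
    calc K ≤ L * (μ + 1) := h1
      _ ≤ N * N := Nat.mul_le_mul hLN hμ1N
  have hμK : μ ≤ K := Nat.find_le ⟨K, hK.1, by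
    have e : K + K = 2 * K := by omega
    rw [e]; exact hK.2.symm⟩
  have hLK : L ∣ K := by
    apply div K K hμK hK.1
    have e : K + K = 2 * K := by omega
    rw [e]; exact hK.2.symm
  have hμKx : x (μ + K) = x μ := by
    obtain ⟨c, hc⟩ := hLK
    have hm := mult c 0
    simp only [Nat.add_zero] at hm
    rw [hc, Nat.mul_comm L c]
    rw [Nat.mul_comm c L] at hm
    rw [Nat.mul_comm c L]
    exact hm
  refine ⟨μ, L, K, hL.1, hK.1, hμLN, hKle, hμK, hL.2, hμKx, ?_, ?_, hK.2, hKmin⟩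
  · intro m p hm hp h
    exact hμmin m hm ⟨p, hp, h⟩
  · intro m p hp hlt h
    have hμm : μ ≤ m := by
      by_contra hc
      exact hμmin m (by omega) ⟨p, hp, h⟩
    have hdvd := div m p hμm hp h
    have : L ≤ p := Nat.le_of_dvd hp hdvd
    omega

-- phase 1 of A returns x K (the Floyd meeting value)
theorem fd_phase1 (nums : List Int) (hP : Pre_findDuplicate0 nums) (K : Nat)
    (hmeet : fdx nums K = fdx nums (2 * K))
    (hmin : ∀ k, 0 < k → k < K → fdx nums k ≠ fdx nums (2 * k)) :
    ∀ fuel s, s < K → K - s ≤ fuel →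
      fdStep1 nums (fdx nums s) (fdx nums (2 * s)) fuel = some (fdx nums K) := by
  intro fuel
  induction fuel with
  | zero => intro s hs hf; omega
  | succ fuel ih =>
    intro s hs hf
    have g1 := fd_get_x nums hP s
    have g2 := fd_get_x nums hP (2 * s)
    have g3 := fd_get_x nums hP (2 * s + 1)
    have e : 2 * s + 1 + 1 = 2 * (s + 1) := by omega
    rw [e] at g3
    simp only [fdStep1, g1, g2, g3]
    by_cases hEq : s + 1 = K
    · rw [if_pos (by rw [hEq]; exact hmeet)]
      rw [hEq]
    · have hlt : s + 1 < K := by omega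
      rw [if_neg (hmin (s+1) (by omega) hlt)]
      exact ih (s+1) hlt (by omega)

-- phase 2 of A returns x μ (the cycle entrance)
theorem fd_phase2 (nums : List Int) (hP : Pre_findDuplicate0 nums) (μ K : Nat)
    (hμK : fdx nums (μ + K) = fdx nums μ)
    (hK : 0 < K)
    (hmin : ∀ m p, m < μ → 0 < p → fdx nums (m + p) ≠ fdx nums m) :
    ∀ fuel j, j ≤ μ → μ - j < fuel →
      fdStep2 nums (fdx nums j) (fdx nums (j + K)) fuel = some (fdx nums μ) := by
  intro fuel
  induction fuel with
  | zero => intro j hj hf; omega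
  | succ fuel ih =>
    intro j hj hf
    by_cases hEq : j = μ
    · subst hEq
      simp only [fdStep2]
      rw [if_pos hμK.symm]
    · have hjμ : j < μ := by omega
      have hne : fdx nums j ≠ fdx nums (j + K) := fun h => hmin j K hjμ hK h.symm
      have g1 := fd_get_x nums hP j
      have g2 := fd_get_x nums hP (j + K)
      have e : j + K + 1 = (j + 1) + K := by omega
      rw [e] at g2
      simp only [fdStep2, g1, g2]
      rw [if_neg hne]
      exact ih (j+1) (by omega) (by omega)

-- the seen-set after j steps of B's walk
def fdSeen (nums : List Int) (j : Nat) : List Int := (List.range j).map (fdx nums)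

-- B's walk returns x μ: the first value repeated on the chain is the cycle entrance
theorem fd_walk (nums : List Int) (hP : Pre_findDuplicate0 nums) (μ L : Nat)
    (hrep : fdx nums (μ + L) = fdx nums μ) (hL : 0 < L)
    (hdist : ∀ m p, 0 < p → m + p < μ + L → fdx nums (m + p) ≠ fdx nums m) :
    ∀ fuel j, j ≤ μ + L → (μ + L) - j < fuel →
      fdWalk nums (fdSeen nums j) (fdx nums j) fuel = some (fdx nums μ) := by
  intro fuel
  induction fuel with
  | zero => intro j hj hf; omega
  | succ fuel ih =>
    intro j hj hf
    by_cases hEq : j = μ + L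
    · subst hEq
      have hmem : PySem.Set.contains (fdSeen nums (μ + L)) (fdx nums (μ + L)) = true := by
        simp only [PySem.Set.contains, List.contains_iff_exists_mem_beq, fdSeen]
        exact ⟨fdx nums μ, List.mem_map.mpr ⟨μ, List.mem_range.mpr (by omega), rfl⟩,
          by simp [hrep]⟩
      simp only [fdWalk, hmem, if_pos]
      rw [hrep]
    · have hjlt : j < μ + L := by omega
      have hnot : PySem.Set.contains (fdSeen nums j) (fdx nums j) = false := by
        rw [Bool.eq_false_iff]
        intro h
        simp only [PySem.Set.contains, List.contains_iff_exists_mem_beq, fdSeen,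
          List.mem_map, List.mem_range, beq_iff_eq] at h
        obtain ⟨a, ⟨i, hi, rfl⟩, heq⟩ := h
        exact hdist i (j - i) (by omega) (by omega)
          (by rw [show i + (j - i) = j from by omega]; exact heq)
      have hadd : PySem.Set.add (fdSeen nums j) (fdx nums j) = fdSeen nums (j+1) := by
        simp only [PySem.Set.add, hnot]
        simp [fdSeen, List.range_succ]
      have g1 := fd_get_x nums hP j
      simp only [fdWalk, hnot, g1]
      rw [hadd]
      exact ih (j+1) (by omega) (by omega)

-- ===== VERDICT (by name: the statement is the Claim_ definition above) =====
theorem findDuplicate0_spec : Claim_equal_findDuplicate0 := by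
  intro nums _ hP
  unfold Spec_findDuplicate0
  obtain ⟨i, j, hij, hjN, hxij⟩ := fd_pigeonhole nums hP
  obtain ⟨μ, L, K, hL, hK, hμLN, hKle, hμK, hrepL, hrepK, hminμ, hdist, hmeet, hKmin⟩ :=
    fd_master (fdf nums) (fdx nums) (2 * nums.length) (fun k => rfl) i j hij hjN hxij
  have hbig : 2 * nums.length < (2*nums.length+1)*(2*nums.length+1) := by nlinarith
  have hbig2 : (2*nums.length) * (2*nums.length) < (2*nums.length+1)*(2*nums.length+1) := by
    nlinarith
  have h0 := fd_get_0 nums hP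
  have h1 := fd_phase1 nums hP K hmeet hKmin
    ((2*nums.length+1)*(2*nums.length+1)) 0 hK (by omega)
  simp only [Nat.mul_zero] at h1
  have h2 := fd_phase2 nums hP μ K hrepK hK hminμ
    ((2*nums.length+1)*(2*nums.length+1)) 0 (Nat.zero_le μ) (by omega)
  simp only [Nat.zero_add] at h2
  have h3 := fd_walk nums hP μ L hrepL hL hdist
    ((2*nums.length+1)*(2*nums.length+1)) 0 (Nat.zero_le _) (by omega)
  simp only [fdSeen, List.range_zero, List.map_nil] at h3
  have hempty : (PySem.Set.empty : PySem.Set Int) = ([] : List Int) := rfl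
  simp only [findDuplicate0, findDuplicate0_alt, h0, h1, h2, h3, hempty]
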